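-- pv_equiv track=rewrite | github.com/SchulerHunter/CMPSC-132 | LAB7.py | recursive_triangle
-- ===== SOURCE A (Python) =====
-- def recursive_triangle(k, n):
--     # If the provided k is zero, return none
--     if k == 0:
--         return ''
--     # Check if the current state is the last and don't make a recursive call
--     elif k - 1 == 0:
--         return((' ' * (n-k)) + ('*' * k))
--     # If the current state is not the last, continue calling
--     elif k - 1 != 0:
--         return((' ' * (n-k)) + ('*' * k) + ('\n') + recursive_triangle(k-1,n))
--     # Backup case is to return none
--     else:
--         return None
-- ===== SOURCE B (Python) =====
-- def recursive_triangle(k, n):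
--     rows = []
--     for i in range(k, 0, -1):
--         rows.append(' ' * (n - i) + '*' * i)
--     return '\n'.join(rows)
-- ===== Notes on version B (the rewrite author's own statement) =====
-- stated objective: simpler
-- what changed: Replaces the tail recursion on k with a single explicit loop over range(k,0,-1) collecting rows joined once by '\n', instead of re-concatenating the whole suffix string at each recursion level.
-- crash fix: For k < 0 A recurses without reaching the base case and raises RecursionError, while B's empty range yields ''. — e.g. on recursive_triangle(-1, 3): A raises RecursionError, B returns ""
import Mathlib
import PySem

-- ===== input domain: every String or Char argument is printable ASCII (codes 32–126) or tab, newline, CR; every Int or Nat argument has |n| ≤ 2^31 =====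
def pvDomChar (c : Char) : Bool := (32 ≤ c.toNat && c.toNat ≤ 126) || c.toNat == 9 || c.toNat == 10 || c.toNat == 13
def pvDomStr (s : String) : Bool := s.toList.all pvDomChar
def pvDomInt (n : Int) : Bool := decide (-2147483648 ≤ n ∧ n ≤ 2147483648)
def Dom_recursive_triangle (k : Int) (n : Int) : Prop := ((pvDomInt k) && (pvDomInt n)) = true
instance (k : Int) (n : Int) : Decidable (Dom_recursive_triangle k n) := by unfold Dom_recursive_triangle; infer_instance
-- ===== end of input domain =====

-- B replaces A's tail recursion by one explicit loop over range(k,0,-1) whose rows are joined with '\n' (objective: simpler).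

-- ===== PORT A =====
-- A recurses on k; for k ≥ 0 (Pre_) the recursion depth is k, so the port recurses on the Nat k.toNat
-- while testing the same Int conditions A tests.
def recursive_triangle_go (m : Nat) (n : Int) : List Char :=
  match m with
  | 0 => []                    -- 'if k == 0: return ""'
  | Nat.succ m' =>
    if ((m' : Int) + 1) - 1 = 0 then
      PySem.List.pyRepeat [' '] (n - ((m' : Int) + 1)) ++ PySem.List.pyRepeat ['*'] ((m' : Int) + 1)
    else
      PySem.List.pyRepeat [' '] (n - ((m' : Int) + 1)) ++ PySem.List.pyRepeat ['*'] ((m' : Int) + 1)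
        ++ ['\n'] ++ recursive_triangle_go m' n

def recursive_triangle (k : Int) (n : Int) : String :=
  String.mk (recursive_triangle_go k.toNat n)

-- ===== PORT B =====
-- one row of the triangle: ' '*(n-i) + '*'*i
def recursive_triangle_row (n i : Int) : List Char :=
  PySem.List.pyRepeat [' '] (n - i) ++ PySem.List.pyRepeat ['*'] i

def recursive_triangle_alt (k : Int) (n : Int) : String :=
  String.mk (PySem.Chars.join ['\n'] ((PySem.List.pyRange k 0 (-1)).map (recursive_triangle_row n)))

-- ===== PRECONDITION & SPEC =====
-- For k < 0 Python A never reaches its base case and raises RecursionError, so those inputs are excluded.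
def Pre_recursive_triangle (k : Int) (n : Int) : Prop := 0 ≤ k
instance (k : Int) (n : Int) : Decidable (Pre_recursive_triangle k n) := by unfold Pre_recursive_triangle; infer_instance
def pvWitness_recursive_triangle : Int × Int := (3, 5)

-- On k < 0 A raises RecursionError while B's empty range yields ''.
def Raises_recursive_triangle (k : Int) (n : Int) : Prop := k < 0
instance (k : Int) (n : Int) : Decidable (Raises_recursive_triangle k n) := by unfold Raises_recursive_triangle; infer_instance
def pvRaiseWitness_recursive_triangle : Int × Int := (-1, 3)
def pvRaiseWitnessOut_recursive_triangle : String := ""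

def Spec_recursive_triangle (k : Int) (n : Int) (out : String) : Prop := out = recursive_triangle_alt k n
instance (k : Int) (n : Int) (out : String) : Decidable (Spec_recursive_triangle k n out) := by unfold Spec_recursive_triangle; infer_instance

-- ===== CLAIM (what is proved, stated in full; the proofs are below) =====
def Claim_equal_recursive_triangle : Prop := ∀ (k : Int) (n : Int), Dom_recursive_triangle k n → Pre_recursive_triangle k n → Spec_recursive_triangle k n (recursive_triangle k n)
def Claim_raises_recursive_triangle : Prop := (∀ (k : Int) (n : Int), Dom_recursive_triangle k n → Raises_recursive_triangle k n → ¬ Pre_recursive_triangle k n) ∧ (Dom_recursive_triangle (pvRaiseWitness_recursive_triangle.1) (pvRaiseWitness_recursive_triangle.2) ∧ Raises_recursive_triangle (pvRaiseWitness_recursive_triangle.1) (pvRaiseWitness_recursive_triangle.2) ∧ recursive_triangle_alt (pvRaiseWitness_recursive_triangle.1) (pvRaiseWitness_recursive_triangle.2) = pvRaiseWitnessOut_recursive_triangle)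

-- ===== LEMMAS AND PROOFS =====

lemma rt_go_succ (m : Nat) (n : Int) :
    recursive_triangle_go (m + 1) n
      = if ((m : Int) + 1) - 1 = 0 then recursive_triangle_row n ((m : Int) + 1)
        else recursive_triangle_row n ((m : Int) + 1) ++ ['\n'] ++ recursive_triangle_go m n := rfl

lemma rt_go_eq_join (m : Nat) (n : Int) :
    recursive_triangle_go m n
      = PySem.Chars.join ['\n'] ((PySem.List.pyRange (m : Int) 0 (-1)).map (recursive_triangle_row n)) := by
  induction m with
  | zero =>
      simp [recursive_triangle_go, PySem.List.pyRange_neg_one_eq_nil, PySem.Chars.join,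
        List.intercalate]
  | succ m' ih =>
      rw [rt_go_succ, show ((m' + 1 : Nat) : Int) = (m' : Int) + 1 by push_cast; ring,
        PySem.List.pyRange_neg_one_cons (by positivity)]
      cases m' with
      | zero =>
          simp [PySem.List.pyRange_neg_one_eq_nil, PySem.Chars.join, List.intercalate]
      | succ m'' =>
          rw [if_neg (by push_cast; omega), ih,
            show ((m'' + 1 : Nat) : Int) + 1 - 1 = ((m'' + 1 : Nat) : Int) by ring,
            PySem.List.pyRange_neg_one_cons (show (0 : Int) < ((m'' + 1 : Nat) : Int) by positivity)]
          simp only [List.map_cons]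
          rw [PySem.Chars.join_cons_cons]

-- ===== VERDICT (by name: the statement is the Claim_ definition above) =====
theorem recursive_triangle_spec : Claim_equal_recursive_triangle := by
  intro k n _ hk
  unfold Spec_recursive_triangle recursive_triangle recursive_triangle_alt
  rw [rt_go_eq_join]
  rw [Int.toNat_of_nonneg hk]

@[simp] theorem recursive_triangle_raises : Claim_raises_recursive_triangle := by
  unfold Claim_raises_recursive_triangle
  constructor
  · intro k n _ h
    unfold Raises_recursive_triangle at h
    unfold Pre_recursive_triangle
    omega
  · decide
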